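-- pv_equiv track=rewrite | github.com/LoiNguyennn/Gem-hunter | main.py | GenerateDNF
-- ===== SOURCE A (Python) =====
-- from itertools import combinations, product
--
-- DIRECTION = [(-1, -1), (-1, 0), (-1, 1), (0, -1), (0, 1), (1, -1), (1, 0), (1, 1)]
--
-- def SurroundingCells(board, x, y):
--     surrounding_cells = []
--     for dir in DIRECTION:
--         x1 = x + dir[0]
--         y1 = y + dir[1]
--         if x1 >= 0 and x1 < len(board) and y1 >= 0 and y1 < len(board[0]):
--             surrounding_cells.append((x1, y1))
--     return surrounding_cells
--
-- def CellID(board, cell):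
--     return cell[0] * len(board[0]) + cell[1] + 1
--
-- def GenerateDNF(board, i, j):
--     dnf = []
--     surrounding_cells = SurroundingCells(board, i, j)
--     for combination in combinations(surrounding_cells, int(board[i][j])):
--         clause = []
--         for cell in surrounding_cells:
--             cell_id = CellID(board, cell)
--             if cell in combination:
--                 clause.append(cell_id)  # cell is a trap
--             else:
--                 clause.append(-cell_id)  # cell is not a trap
--         dnf.append(clause)
--     return dnf
-- ===== SOURCE B (Python) =====
-- DIRECTION = [(-1, -1), (-1, 0), (-1, 1), (0, -1), (0, 1), (1, -1), (1, 0), (1, 1)]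
--
-- def SurroundingCells(board, x, y):
--     surrounding_cells = []
--     for dir in DIRECTION:
--         x1 = x + dir[0]
--         y1 = y + dir[1]
--         if x1 >= 0 and x1 < len(board) and y1 >= 0 and y1 < len(board[0]):
--             surrounding_cells.append((x1, y1))
--     return surrounding_cells
--
-- def CellID(board, cell):
--     return cell[0] * len(board[0]) + cell[1] + 1
--
-- def _gen(ids, k):
--     # all ways to pick k traps among ids, head-first: head is a trap (+) or not (-)
--     if k == 0:
--         return [[-x for x in ids]]
--     if not ids:
--         return []
--     x, rest = ids[0], ids[1:]
--     return [[x] + cl for cl in _gen(rest, k - 1)] + [[-x] + cl for cl in _gen(rest, k)]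
--
-- def GenerateDNF(board, i, j):
--     ids = [CellID(board, c) for c in SurroundingCells(board, i, j)]
--     return _gen(ids, int(board[i][j]))
-- ===== Notes on version B (the rewrite author's own statement) =====
-- stated objective: alternative
-- what changed: B drops itertools.combinations and the per-cell membership test entirely: it recursively generates the DNF over the id list directly (head id taken positive with k-1 remaining traps, or negative with k), emitting each clause once.
import Mathlib
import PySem

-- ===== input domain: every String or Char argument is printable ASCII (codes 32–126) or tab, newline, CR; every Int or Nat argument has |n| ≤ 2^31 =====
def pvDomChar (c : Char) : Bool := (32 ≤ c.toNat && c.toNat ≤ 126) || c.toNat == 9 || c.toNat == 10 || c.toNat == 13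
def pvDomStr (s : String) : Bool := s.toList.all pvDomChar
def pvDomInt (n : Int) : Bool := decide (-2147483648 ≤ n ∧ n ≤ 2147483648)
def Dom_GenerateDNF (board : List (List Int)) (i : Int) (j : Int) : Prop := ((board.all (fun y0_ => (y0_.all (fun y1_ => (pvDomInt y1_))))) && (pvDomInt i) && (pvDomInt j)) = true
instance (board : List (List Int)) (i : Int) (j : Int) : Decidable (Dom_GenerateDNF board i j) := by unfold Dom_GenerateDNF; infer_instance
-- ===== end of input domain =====

-- B replaces itertools.combinations + per-cell membership test by a direct recursive
-- generator over the id list (head id positive with k-1 traps left, or negative with k).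

-- shared module context (identical in Source A and Source B)
def pvDirection : List (Int × Int) :=
  [(-1, -1), (-1, 0), (-1, 1), (0, -1), (0, 1), (1, -1), (1, 0), (1, 1)]

def SurroundingCellsPort (board : List (List Int)) (x : Int) (y : Int) : List (Int × Int) :=
  -- the append-loop over DIRECTION, as a filterMap over the same list
  pvDirection.filterMap (fun d =>
    let x1 := x + d.1
    let y1 := y + d.2
    if 0 ≤ x1 ∧ x1 < (board.length : Int) ∧ 0 ≤ y1 ∧ y1 < ((board.headD []).length : Int)
    then some (x1, y1) else none)

def CellIDPort (board : List (List Int)) (cell : Int × Int) : Int :=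
  cell.1 * ((board.headD []).length : Int) + cell.2 + 1

-- itertools.combinations (library call in A), in itertools' order
def pyCombinations {α : Type} : List α → Nat → List (List α)
  | _, 0 => [[]]
  | [], _ + 1 => []
  | x :: xs, k + 1 =>
    (pyCombinations xs k).map (fun c => x :: c) ++ pyCombinations xs (k + 1)

-- ===== PORT A =====
def GenerateDNF (board : List (List Int)) (i : Int) (j : Int) : List (List Int) :=
  match (PySem.List.pyGet? board i).bind (fun r => PySem.List.pyGet? r j) with
  | none => []  -- board[i][j] raises IndexError: outside Pre_
  | some v =>   -- v < 0 raises ValueError in combinations: outside Pre_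
    let cells := SurroundingCellsPort board i j
    (pyCombinations cells v.toNat).map (fun combination =>
      cells.map (fun cell =>
        let cid := CellIDPort board cell
        if cell ∈ combination then cid else -cid))

-- ===== PORT B =====
-- Source B's _gen: recursion on the id list, k stays a Python int
def genDNF (ids : List Int) (k : Int) : List (List Int) :=
  if k = 0 then [ids.map (fun x => -x)]
  else
    match ids with
    | [] => []
    | x :: rest =>
      (genDNF rest (k - 1)).map (fun cl => x :: cl) ++
      (genDNF rest k).map (fun cl => -x :: cl)

def GenerateDNF_alt (board : List (List Int)) (i : Int) (j : Int) : List (List Int) :=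
  match (PySem.List.pyGet? board i).bind (fun r => PySem.List.pyGet? r j) with
  | none => []  -- board[i][j] raises IndexError: outside Pre_
  | some v =>
    let ids := (SurroundingCellsPort board i j).map (CellIDPort board)
    genDNF ids v

-- ===== PRECONDITION & SPEC =====
-- Pre_ excludes exactly the inputs where A raises: board[i][j] out of range (IndexError)
-- or a negative trap count board[i][j] (ValueError from combinations).
def Pre_GenerateDNF (board : List (List Int)) (i : Int) (j : Int) : Prop :=
  0 ≤ (((PySem.List.pyGet? board i).bind (fun r => PySem.List.pyGet? r j)).getD (-1))

instance (board : List (List Int)) (i : Int) (j : Int) : Decidable (Pre_GenerateDNF board i j) := by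
  unfold Pre_GenerateDNF; infer_instance

def pvWitness_GenerateDNF : List (List Int) × Int × Int := ([[1, 0], [0, 0]], 0, 0)

def Spec_GenerateDNF (board : List (List Int)) (i : Int) (j : Int) (out : List (List Int)) : Prop := out = GenerateDNF_alt board i j
instance (board : List (List Int)) (i : Int) (j : Int) (out : List (List Int)) : Decidable (Spec_GenerateDNF board i j out) := by unfold Spec_GenerateDNF; infer_instance

-- ===== CLAIM (what is proved, stated in full; the proofs are below) =====
def Claim_equal_GenerateDNF : Prop := ∀ (board : List (List Int)) (i : Int) (j : Int), Dom_GenerateDNF board i j → Pre_GenerateDNF board i j → Spec_GenerateDNF board i j (GenerateDNF board i j)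

-- ===== LEMMAS AND PROOFS =====

theorem pyCombinations_sublist {α : Type} :
    ∀ (xs : List α) (k : Nat) (c : List α), c ∈ pyCombinations xs k → c.Sublist xs
  | _, 0, c => by
    intro h; simp [pyCombinations] at h; simp [h]
  | [], _ + 1, c => by
    intro h; simp [pyCombinations] at h
  | x :: xs, k + 1, c => by
    intro h
    simp only [pyCombinations, List.mem_append, List.mem_map] at h
    rcases h with ⟨c', hc', rfl⟩ | h
    · exact List.Sublist.cons₂ x (pyCombinations_sublist xs k c' hc')
    · exact List.Sublist.cons x (pyCombinations_sublist xs (k + 1) c h)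

theorem surrounding_nodup (board : List (List Int)) (x y : Int) :
    (SurroundingCellsPort board x y).Nodup := by
  unfold SurroundingCellsPort
  apply List.Nodup.filterMap
  · rintro ⟨a1, a2⟩ ⟨b1, b2⟩ ⟨c1, c2⟩ ha hb
    simp only [Option.mem_def] at ha hb
    split_ifs at ha hb with h1 h2 <;> simp_all
    obtain ⟨hc1, hc2⟩ := ha
    obtain ⟨hd1, hd2⟩ := hb
    constructor
    · omega
    · omega
  · decide

-- the heart: A's combinations+membership pass equals B's recursive generator
theorem comb_eq_gen (f : (Int × Int) → Int) :
    ∀ (cells : List (Int × Int)) (k : Nat), cells.Nodup →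
      (pyCombinations cells k).map (fun comb =>
          cells.map (fun cell => if cell ∈ comb then f cell else -(f cell))) =
        genDNF (cells.map f) (k : Int)
  | cells, 0, _ => by
    rw [genDNF.eq_def]
    simp [pyCombinations]
  | [], k + 1, _ => by
    have : (((k + 1 : Nat) : Int)) ≠ 0 := by push_cast; omega
    rw [genDNF.eq_def]
    simp only [pyCombinations, List.map_nil]
    rw [if_neg this]
  | c :: cs, k + 1, hnd => by
    have hne : (((k + 1 : Nat) : Int)) ≠ 0 := by push_cast; omega
    have hcns : c ∉ cs := (List.nodup_cons.mp hnd).1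
    have hcsnd : cs.Nodup := (List.nodup_cons.mp hnd).2
    have ih1 := comb_eq_gen f cs k hcsnd
    have ih2 := comb_eq_gen f cs (k + 1) hcsnd
    have hk1 : ((k + 1 : Nat) : Int) - 1 = (k : Int) := by push_cast; ring
    simp only [pyCombinations, List.map_append, List.map_map]
    rw [genDNF.eq_def]
    simp only [hne, if_false, List.map_cons, hk1]
    congr 1
    · -- combinations containing the head c
      rw [← ih1, List.map_map]
      apply List.map_congr_left
      intro comb' hcomb'
      have hsub : comb'.Sublist cs := pyCombinations_sublist cs k comb' hcomb'
      simp only [Function.comp_apply, List.map_cons, List.mem_cons, true_or, if_pos, List.cons.injEq]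
      refine ⟨by simp, ?_⟩
      apply List.map_congr_left
      intro cell hcell
      have : cell ≠ c := fun h => hcns (h ▸ hcell)
      simp [this]
    · -- combinations not containing the head c
      rw [← ih2, List.map_map]
      apply List.map_congr_left
      intro comb hcomb
      have hsub : comb.Sublist cs := pyCombinations_sublist cs (k + 1) comb hcomb
      have hcnot : c ∉ comb := fun h => hcns (hsub.subset h)
      simp only [Function.comp_apply, List.map_cons, hcnot, List.cons.injEq]
      exact ⟨by simp, trivial⟩

-- ===== VERDICT (by name: the statement is the Claim_ definition above) =====
theorem GenerateDNF_spec : Claim_equal_GenerateDNF := by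
  intro board i j _ hpre
  unfold Spec_GenerateDNF GenerateDNF GenerateDNF_alt
  unfold Pre_GenerateDNF at hpre
  cases hv : (PySem.List.pyGet? board i).bind (fun r => PySem.List.pyGet? r j) with
  | none => rfl
  | some v =>
    rw [hv] at hpre
    simp only [Option.getD_some] at hpre
    have hvt : ((v.toNat : Nat) : Int) = v := Int.toNat_of_nonneg hpre
    simp only []
    conv_rhs => rw [← hvt]
    rw [← comb_eq_gen (CellIDPort board) (SurroundingCellsPort board i j) v.toNat
      (surrounding_nodup board i j)]
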